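-- pv_equiv track=rewrite | github.com/RenanSerrano123/vector-comparison | vectorcomparison.py | verifica_multiplicacao
-- ===== SOURCE A (Python) =====
-- def verifica_multiplicacao(vetor1, vetor2):
--     n = len(vetor1)
--     multiplicador = None
--     for i in range(n):
--         if vetor1[i] == 0:
--             if vetor2[i] != 0:
--                 return False
--         else:
--             if vetor2[i] % vetor1[i] != 0:
--                 return False
--             if multiplicador is None:
--                 multiplicador = vetor2[i] // vetor1[i]
--             else:
--                 if vetor2[i] // vetor1[i] != multiplicador:
--                     return False
--     return True
-- ===== SOURCE B (Python) =====
-- def verifica_multiplicacao(vetor1, vetor2):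
--     # Cross-multiplication test: vetor2 is an integer multiple of vetor1 iff
--     # b * a0 == b0 * a for every pair against the first nonzero pivot (a0, b0)
--     # and b0 divides exactly once by a0 (integrality). Only one division total.
--     for a0, b0 in zip(vetor1, vetor2):
--         if a0 != 0:
--             return b0 % a0 == 0 and all(b * a0 == b0 * a for a, b in zip(vetor1, vetor2))
--     return all(b == 0 for _, b in zip(vetor1, vetor2))
-- ===== Notes on version B (the rewrite author's own statement) =====
-- stated objective: alternative
-- what changed: Replaces A's per-element floor-division/modulo loop with a running Optional multiplier by a cross-multiplication proportionality test against the first nonzero pivot (b * a0 == b0 * a for every pair) plus a single divisibility check b0 % a0 == 0; zeros and the common-quotient condition fall out of the cross products, no per-element division remains.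
import Mathlib
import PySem

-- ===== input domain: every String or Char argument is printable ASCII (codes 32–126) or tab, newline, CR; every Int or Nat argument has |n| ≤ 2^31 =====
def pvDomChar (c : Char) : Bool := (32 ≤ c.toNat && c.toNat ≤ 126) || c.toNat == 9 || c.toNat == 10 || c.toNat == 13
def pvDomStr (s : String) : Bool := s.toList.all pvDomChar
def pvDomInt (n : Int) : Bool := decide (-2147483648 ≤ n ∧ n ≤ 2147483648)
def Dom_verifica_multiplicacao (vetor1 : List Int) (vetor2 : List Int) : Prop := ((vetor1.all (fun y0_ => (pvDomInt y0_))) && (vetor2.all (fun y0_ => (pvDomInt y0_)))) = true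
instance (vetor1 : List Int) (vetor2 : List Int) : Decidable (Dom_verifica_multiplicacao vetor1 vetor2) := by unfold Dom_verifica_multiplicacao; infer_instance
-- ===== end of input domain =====

-- B replaces A's per-element floor-division loop with a running Optional multiplier by a
-- cross-multiplication proportionality test against the first nonzero pivot plus one divisibility
-- check; equivalence is proved on inputs where A does not raise IndexError (Pre_ below).


-- ===== PORT A =====
-- the 'for i in range(n)' loop of A, carrying 'multiplicador : Option Int';
-- vetor2[i] is read with pyGet? (IndexError = none, excluded by Pre_; `false` there is dead code under Pre_)
def vmA_go (vetor1 : List Int) (vetor2 : List Int) (i : Nat) (m : Option Int) : Bool :=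
  if h : i < vetor1.length then
    match PySem.List.pyGet? vetor2 (i : Int) with
    | none => false
    | some b =>
      let a := vetor1[i]
      if a = 0 then
        if b ≠ 0 then false else vmA_go vetor1 vetor2 (i + 1) m
      else
        if PySem.Int.mod b a ≠ 0 then false
        else
          match m with
          | none => vmA_go vetor1 vetor2 (i + 1) (some (PySem.Int.floordiv b a))
          | some m' =>
            if PySem.Int.floordiv b a ≠ m' then false
            else vmA_go vetor1 vetor2 (i + 1) (some m')
  else true
termination_by vetor1.length - i

def verifica_multiplicacao (vetor1 : List Int) (vetor2 : List Int) : Bool :=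
  vmA_go vetor1 vetor2 0 none

-- ===== PORT B =====
-- B's 'for a0, b0 in zip(...)' loop: return at the first nonzero pivot with the
-- cross-multiplication check over the full zip, else fall through to the all-zero check
def vmB_loop (full : List (Int × Int)) : List (Int × Int) → Bool
  | [] => full.all (fun p => p.2 = 0)
  | (a0, b0) :: rest =>
    if a0 ≠ 0 then
      (PySem.Int.mod b0 a0 = 0) && full.all (fun p => p.2 * a0 = b0 * p.1)
    else vmB_loop full rest

def verifica_multiplicacao_alt (vetor1 : List Int) (vetor2 : List Int) : Bool :=
  vmB_loop (vetor1.zip vetor2) (vetor1.zip vetor2)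

-- ===== PRECONDITION & SPEC =====
-- GoodPairs ps: every zero first component is matched by a zero, and all nonzero positions
-- divide exactly with one common quotient (a closed-form condition on the input pairs)
def GoodPairs (ps : List (Int × Int)) : Prop :=
  ∀ p ∈ ps, (p.1 = 0 → p.2 = 0) ∧
    (p.1 ≠ 0 → PySem.Int.mod p.2 p.1 = 0 ∧
      ∀ q ∈ ps, q.1 ≠ 0 → PySem.Int.floordiv p.2 p.1 = PySem.Int.floordiv q.2 q.1)
-- Pre_ excludes exactly the inputs on which A raises IndexError: vetor2 shorter than vetor1
-- with the whole shared prefix consistent, so A's loop reaches the missing vetor2[i].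
def Pre_verifica_multiplicacao (vetor1 : List Int) (vetor2 : List Int) : Prop :=
  vetor1.length ≤ vetor2.length ∨ ¬ GoodPairs (vetor1.zip vetor2)
instance (vetor1 : List Int) (vetor2 : List Int) : Decidable (Pre_verifica_multiplicacao vetor1 vetor2) := by unfold Pre_verifica_multiplicacao GoodPairs; infer_instance
def pvWitness_verifica_multiplicacao : List Int × List Int := ([2, 0, -3], [6, 0, -9])

def Spec_verifica_multiplicacao (vetor1 : List Int) (vetor2 : List Int) (out : Bool) : Prop := out = verifica_multiplicacao_alt vetor1 vetor2
instance (vetor1 : List Int) (vetor2 : List Int) (out : Bool) : Decidable (Spec_verifica_multiplicacao vetor1 vetor2 out) := by unfold Spec_verifica_multiplicacao; infer_instance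

-- ===== CLAIM (what is proved, stated in full; the proofs are below) =====
def Claim_equal_verifica_multiplicacao : Prop := ∀ (vetor1 : List Int) (vetor2 : List Int), Dom_verifica_multiplicacao vetor1 vetor2 → Pre_verifica_multiplicacao vetor1 vetor2 → Spec_verifica_multiplicacao vetor1 vetor2 (verifica_multiplicacao vetor1 vetor2)

-- ===== LEMMAS AND PROOFS =====

-- A's loop re-expressed as structural recursion on the zipped pairs
def vmZip (ps : List (Int × Int)) (m : Option Int) : Bool :=
  match ps with
  | [] => true
  | (a, b) :: rest =>
    if a = 0 then
      if b ≠ 0 then false else vmZip rest m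
    else
      if PySem.Int.mod b a ≠ 0 then false
      else
        match m with
        | none => vmZip rest (some (PySem.Int.floordiv b a))
        | some m' =>
          if PySem.Int.floordiv b a ≠ m' then false else vmZip rest (some m')

-- a common normal form both loops are reduced to: pivot = first nonzero entry of vetor1,
-- then the multiplier-based elementwise description
def altSpec (ps : List (Int × Int)) : Bool :=
  match ps.find? (fun p => p.1 ≠ 0) with
  | none => ps.all (fun p => p.2 = 0)
  | some (a0, b0) =>
    if PySem.Int.mod b0 a0 ≠ 0 then false
    else ps.all (fun p => if p.1 = 0 then p.2 = 0
                          else p.2 = p.1 * PySem.Int.floordiv b0 a0)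

theorem vmA_go_eq_vmZip (vetor1 vetor2 : List Int) (hlen : vetor1.length ≤ vetor2.length)
    (i : Nat) (m : Option Int) :
    vmA_go vetor1 vetor2 i m = vmZip ((vetor1.zip vetor2).drop i) m := by
  induction hk : vetor1.length - i generalizing i m with
  | zero =>
    rw [vmA_go]
    have hge : vetor1.length ≤ i := by omega
    rw [List.drop_eq_nil_of_le (by simp [List.length_zip]; omega)]
    simp [vmZip, Nat.not_lt.mpr hge]
  | succ k ih =>
    have hi : i < vetor1.length := by omega
    have hi2 : i < vetor2.length := by omega
    rw [vmA_go, dif_pos hi]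
    have hget : PySem.List.pyGet? vetor2 (i : Int) = some vetor2[i] := by
      simp [PySem.List.pyGet?_natCast, List.getElem?_eq_getElem hi2]
    rw [hget]
    have hdrop : (vetor1.zip vetor2).drop i
        = (vetor1[i], vetor2[i]) :: (vetor1.zip vetor2).drop (i + 1) := by
      have : i < (vetor1.zip vetor2).length := by simp [List.length_zip]; omega
      rw [List.drop_eq_getElem_cons this]
      simp
    rw [hdrop]
    simp only [vmZip]
    by_cases ha : vetor1[i] = 0
    · simp only [ha]
      by_cases hb : vetor2[i] ≠ 0
      · simp [hb]
      · simp only [hb]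
        exact ih (i + 1) m (by omega)
    · simp only [if_neg ha]
      by_cases hmod : PySem.Int.mod vetor2[i] vetor1[i] ≠ 0
      · simp [hmod]
      · simp only [hmod]
        cases m with
        | none => exact ih (i + 1) _ (by omega)
        | some m' =>
          by_cases hq : PySem.Int.floordiv vetor2[i] vetor1[i] ≠ m'
          · simp [hq]
          · simp only [hq]
            exact ih (i + 1) _ (by omega)

-- exact division characterisation: for a ≠ 0, (b % a = 0 ∧ b // a = m) ↔ b = a * m
theorem exact_div_iff (a b m : Int) (ha : a ≠ 0) :
    (PySem.Int.mod b a = 0 ∧ PySem.Int.floordiv b a = m) ↔ b = a * m := by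
  have hid := PySem.Int.floordiv_mul_add_mod b a
  constructor
  · rintro ⟨h1, h2⟩
    rw [h1, h2] at hid
    linarith [hid]
  · intro hb
    have hdvd : PySem.Int.floordiv b a = m := by
      subst hb
      have hf : PySem.Int.floordiv (a * m) a = Int.fdiv (a * m) a := by
        simp [PySem.Int.floordiv]
      rw [hf, Int.mul_comm, Int.mul_fdiv_cancel _ ha]
    refine ⟨?_, hdvd⟩
    have : PySem.Int.floordiv b a * a + PySem.Int.mod b a = b := hid
    rw [hdvd] at this
    subst hb
    linarith [this]

-- with the multiplier fixed, the rest of A's loop is the elementwise predicate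
theorem vmZip_some (ps : List (Int × Int)) (m : Int) :
    vmZip ps (some m) = ps.all (fun p => if p.1 = 0 then p.2 = 0 else p.2 = p.1 * m) := by
  induction ps with
  | nil => simp [vmZip]
  | cons p rest ih =>
    obtain ⟨a, b⟩ := p
    rw [vmZip]
    by_cases ha : a = 0
    · by_cases hb : b = 0
      · simp [ha, hb, ih]
      · simp [ha, hb]
    · by_cases hab : b = a * m
      · have h2 := (exact_div_iff a b m ha).mpr hab
        subst hab
        simp [ha, h2.1, h2.2, ih]
      · have : ¬ (PySem.Int.mod b a = 0 ∧ PySem.Int.floordiv b a = m) := by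
          rw [exact_div_iff a b m ha]; exact hab
        by_cases hmod : PySem.Int.mod b a = 0
        · have hq : PySem.Int.floordiv b a ≠ m := fun h => this ⟨hmod, h⟩
          simp [ha, hmod, hq, hab]
        · simp [ha, hmod, hab]

-- searching phase: A's loop with multiplier not yet set equals the normal form
theorem vmZip_none_eq_altSpec (ps : List (Int × Int)) : vmZip ps none = altSpec ps := by
  induction ps with
  | nil => simp [vmZip, altSpec]
  | cons p rest ih =>
    obtain ⟨a, b⟩ := p
    unfold altSpec
    by_cases ha : a = 0
    · rw [vmZip, if_pos ha]
      have hfind : ((a, b) :: rest).find? (fun p => p.1 ≠ 0) = rest.find? (fun p => p.1 ≠ 0) := by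
        simp [List.find?, ha]
      rw [hfind]
      by_cases hb : b = 0
      · simp only [hb, ne_eq, not_true_eq_false, if_false, ih]
        unfold altSpec
        cases hf : rest.find? (fun p => p.1 ≠ 0) with
        | none => simp [ha]
        | some q =>
          obtain ⟨a0, b0⟩ := q
          by_cases hm : PySem.Int.mod b0 a0 ≠ 0
          · simp [hm]
          · simp [hm, ha]
      · simp only [hb, ne_eq, not_false_eq_true, if_true]
        cases hf : rest.find? (fun p => p.1 ≠ 0) with
        | none => simp [hb]
        | some q =>
          obtain ⟨a0, b0⟩ := q
          by_cases hm : PySem.Int.mod b0 a0 ≠ 0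
          · simp [hm]
          · rw [ne_eq, not_not] at hm
            simp only [hm]
            simp [ha, hb]
    · rw [vmZip, if_neg ha]
      have hfind : ((a, b) :: rest).find? (fun p => p.1 ≠ 0) = some (a, b) := by
        simp [List.find?, ha]
      rw [hfind]
      by_cases hm : PySem.Int.mod b a ≠ 0
      · simp [hm]
      · rw [ne_eq, not_not] at hm
        have hnm : ¬ (PySem.Int.mod b a ≠ 0) := fun h => h hm
        simp only [if_neg hnm]
        rw [vmZip_some]
        have hb' : b = a * PySem.Int.floordiv b a := by
          have hid := PySem.Int.floordiv_mul_add_mod b a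
          rw [hm] at hid
          linarith [hid]
        have hhead : (decide (b = a * PySem.Int.floordiv b a)) = true := decide_eq_true hb'
        simp [List.all_cons, ha, hhead]

-- B's loop is find?-then-cross-check over the full pairs
theorem vmB_loop_eq_find (full ps : List (Int × Int)) :
    vmB_loop full ps =
      (match ps.find? (fun p => p.1 ≠ 0) with
       | none => full.all (fun p => p.2 = 0)
       | some (a0, b0) =>
         (PySem.Int.mod b0 a0 = 0) && full.all (fun p => p.2 * a0 = b0 * p.1)) := by
  induction ps with
  | nil => simp [vmB_loop]
  | cons p rest ih =>
    obtain ⟨a, b⟩ := p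
    by_cases ha : a = 0
    · have hfind : ((a, b) :: rest).find? (fun p => p.1 ≠ 0) = rest.find? (fun p => p.1 ≠ 0) := by
        simp [List.find?, ha]
      rw [hfind, vmB_loop, if_neg (by simpa using ha), ih]
    · have hfind : ((a, b) :: rest).find? (fun p => p.1 ≠ 0) = some (a, b) := by
        simp [List.find?, ha]
      rw [hfind, vmB_loop, if_pos ha]

-- the cross-multiplication check against (a0, a0*m) is the elementwise multiplier predicate
theorem cross_all_eq (ps : List (Int × Int)) (a0 m : Int) (ha0 : a0 ≠ 0) :
    ps.all (fun p => p.2 * a0 = (a0 * m) * p.1)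
      = ps.all (fun p => if p.1 = 0 then p.2 = 0 else p.2 = p.1 * m) := by
  induction ps with
  | nil => rfl
  | cons p rest ih =>
    obtain ⟨a, b⟩ := p
    have hpt : (b * a0 = (a0 * m) * a) ↔ (if a = 0 then b = 0 else b = a * m) := by
      by_cases haz : a = 0
      · subst haz
        constructor
        · intro h
          have : b * a0 = 0 := by linarith [h]
          rcases mul_eq_zero.mp this with h' | h'
          · exact h'
          · exact absurd h' ha0
        · intro h; subst h; ring
      · simp only [if_neg haz]
        constructor
        · intro h
          have : b * a0 = (a * m) * a0 := by linarith [h]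
          exact mul_right_cancel₀ ha0 this
        · intro h; subst h; ring
    simp [List.all_cons, hpt, ih]

-- B equals the normal form
theorem alt_eq_altSpec (vetor1 vetor2 : List Int) :
    verifica_multiplicacao_alt vetor1 vetor2 = altSpec (vetor1.zip vetor2) := by
  unfold verifica_multiplicacao_alt altSpec
  rw [vmB_loop_eq_find]
  cases hf : (vetor1.zip vetor2).find? (fun p => p.1 ≠ 0) with
  | none => rfl
  | some q =>
    obtain ⟨a0, b0⟩ := q
    have ha0 : a0 ≠ 0 := by simpa using List.find?_some hf
    by_cases hm : PySem.Int.mod b0 a0 = 0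
    · have hb0 : b0 = a0 * PySem.Int.floordiv b0 a0 := by
        have hid := PySem.Int.floordiv_mul_add_mod b0 a0
        rw [hm] at hid
        linarith [hid]
      have hc := cross_all_eq (vetor1.zip vetor2) a0 (PySem.Int.floordiv b0 a0) ha0
      rw [← hb0] at hc
      simp [hm, hc]
    · simp [hm]

-- A's loop on the whole zip IS B
theorem vmZip_eq_alt (vetor1 vetor2 : List Int) :
    vmZip (vetor1.zip vetor2) none = verifica_multiplicacao_alt vetor1 vetor2 := by
  rw [vmZip_none_eq_altSpec, alt_eq_altSpec]

-- if B answers true, the pairs are consistent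
theorem alt_true_good (vetor1 vetor2 : List Int)
    (h : verifica_multiplicacao_alt vetor1 vetor2 = true) :
    GoodPairs (vetor1.zip vetor2) := by
  rw [alt_eq_altSpec] at h
  unfold altSpec at h
  cases hf : (vetor1.zip vetor2).find? (fun p => p.1 ≠ 0) with
  | none =>
    rw [hf] at h
    simp only [List.all_eq_true] at h
    intro p hp
    refine ⟨fun _ => by simpa using h p hp, fun hne => ?_⟩
    have hz : p.1 = 0 := by simpa using List.find?_eq_none.mp hf p hp
    exact absurd hz hne
  | some q =>
    obtain ⟨a0, b0⟩ := q
    rw [hf] at h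
    by_cases hm : PySem.Int.mod b0 a0 ≠ 0
    · simp [hm] at h
    · rw [ne_eq, not_not] at hm
      have ha0 : a0 ≠ 0 := by
        have := List.find?_some hf
        simpa using this
      simp only [if_neg (by simpa using hm : ¬ PySem.Int.mod b0 a0 ≠ 0), List.all_eq_true] at h
      intro p hp
      have hp' := h p hp
      constructor
      · intro hz; simpa [hz] using hp'
      · intro hne
        have hb : p.2 = p.1 * PySem.Int.floordiv b0 a0 := by simpa [hne] using hp'
        have hpd := (exact_div_iff p.1 p.2 (PySem.Int.floordiv b0 a0) hne).mpr hb
        refine ⟨hpd.1, fun r hr hrne => ?_⟩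
        have hr' := h r hr
        have hrb : r.2 = r.1 * PySem.Int.floordiv b0 a0 := by simpa [hrne] using hr'
        have hrd := (exact_div_iff r.1 r.2 (PySem.Int.floordiv b0 a0) hrne).mpr hrb
        rw [hpd.2, hrd.2]

-- if the remaining zipped pairs already force a false answer, A's index loop returns false
-- (it never reaches the truncated end of vetor2)
theorem vmA_go_false (vetor1 vetor2 : List Int) (i : Nat) (m : Option Int)
    (h : vmZip ((vetor1.zip vetor2).drop i) m = false) :
    vmA_go vetor1 vetor2 i m = false := by
  induction hk : vetor1.length - i generalizing i m with
  | zero =>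
    exfalso
    have hdrop : (vetor1.zip vetor2).drop i = [] :=
      List.drop_eq_nil_of_le (by simp [List.length_zip]; omega)
    rw [hdrop] at h; simp [vmZip] at h
  | succ k ih =>
    have hi : i < vetor1.length := by omega
    by_cases hi2 : i < vetor2.length
    · rw [vmA_go, dif_pos hi]
      have hget : PySem.List.pyGet? vetor2 (i : Int) = some vetor2[i] := by
        simp [PySem.List.pyGet?_natCast, List.getElem?_eq_getElem hi2]
      rw [hget]
      have hdrop : (vetor1.zip vetor2).drop i
          = (vetor1[i], vetor2[i]) :: (vetor1.zip vetor2).drop (i + 1) := by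
        have : i < (vetor1.zip vetor2).length := by simp [List.length_zip]; omega
        rw [List.drop_eq_getElem_cons this]
        simp
      rw [hdrop] at h
      simp only [vmZip] at h
      by_cases ha : vetor1[i] = 0
      · simp only [ha] at h ⊢
        by_cases hb : vetor2[i] ≠ 0
        · simp [hb]
        · simp only [if_neg hb] at h ⊢
          exact ih (i + 1) m h (by omega)
      · simp only [if_neg ha] at h ⊢
        by_cases hmod : PySem.Int.mod vetor2[i] vetor1[i] ≠ 0
        · simp [hmod]
        · simp only [if_neg hmod] at h ⊢
          cases m with
          | none => exact ih (i + 1) _ h (by omega)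
          | some m' =>
            by_cases hq : PySem.Int.floordiv vetor2[i] vetor1[i] ≠ m'
            · simp [hq]
            · simp only [if_neg hq] at h ⊢
              exact ih (i + 1) _ h (by omega)
    · exfalso
      have hdrop : (vetor1.zip vetor2).drop i = [] :=
        List.drop_eq_nil_of_le (by simp [List.length_zip]; omega)
      rw [hdrop] at h; simp [vmZip] at h

-- ===== VERDICT (by name: the statement is the Claim_ definition above) =====
theorem verifica_multiplicacao_spec : Claim_equal_verifica_multiplicacao := by
  intro vetor1 vetor2 _ hpre
  unfold Spec_verifica_multiplicacao
  rcases hpre with hlen | hbad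
  · unfold verifica_multiplicacao
    rw [vmA_go_eq_vmZip vetor1 vetor2 hlen 0 none, List.drop_zero, vmZip_eq_alt]
  · have halt : verifica_multiplicacao_alt vetor1 vetor2 = false := by
      cases halt : verifica_multiplicacao_alt vetor1 vetor2 with
      | false => rfl
      | true => exact absurd (alt_true_good vetor1 vetor2 halt) hbad
    have hz : vmZip (vetor1.zip vetor2) none = false := by rw [vmZip_eq_alt, halt]
    unfold verifica_multiplicacao
    rw [vmA_go_false vetor1 vetor2 0 none (by simpa using hz), halt]
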